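-- pv_equiv track=rewrite | github.com/shutu777/bm-api | app/search.py | _should_strict_number_search
-- ===== SOURCE A (Python) =====
-- def _should_strict_number_search(keyword: str) -> bool:
--     stripped = "".join(ch for ch in keyword if not ch.isspace())
--     if not stripped:
--         return False
--     if not stripped.isascii():
--         return False
--     sanitized = stripped.replace("-", "").replace("_", "")
--     if not sanitized.isalnum():
--         return False
--     has_alpha = any(ch.isalpha() for ch in sanitized)
--     has_digit = any(ch.isdigit() for ch in sanitized)
--     if has_alpha and has_digit:
--         return True
--     if sanitized.isalpha() and 2 <= len(sanitized) <= 6: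
--         return True
--     return False
-- ===== SOURCE B (Python) =====
-- def _should_strict_number_search(keyword: str) -> bool:
--     seen = False
--     non_ascii = False
--     invalid = False
--     alpha = 0
--     digit = 0
--     for ch in keyword:
--         if ch.isspace():
--             continue
--         seen = True
--         if not ch.isascii():
--             non_ascii = True
--         elif ch in "-_":
--             pass  # separator, removed
--         elif ch.isalpha():
--             alpha += 1
--         elif ch.isdigit():
--             digit += 1
--         else:
--             invalid = True
--     if not seen or non_ascii or invalid or alpha + digit == 0:
--         return False
--     if alpha > 0 and digit > 0:
--         return True
--     return digit == 0 and 2 <= alpha <= 6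
-- ===== Notes on version B (the rewrite author's own statement) =====
-- stated objective: alternative
-- what changed: Replaces A's transform-then-test pipeline (join-filter, isascii, two replace passes, isalnum, two any passes, isalpha, len) by a single classifying scan over the characters that maintains seen/non_ascii/invalid flags and alpha/digit counters, deciding from those at the end.
import Mathlib
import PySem

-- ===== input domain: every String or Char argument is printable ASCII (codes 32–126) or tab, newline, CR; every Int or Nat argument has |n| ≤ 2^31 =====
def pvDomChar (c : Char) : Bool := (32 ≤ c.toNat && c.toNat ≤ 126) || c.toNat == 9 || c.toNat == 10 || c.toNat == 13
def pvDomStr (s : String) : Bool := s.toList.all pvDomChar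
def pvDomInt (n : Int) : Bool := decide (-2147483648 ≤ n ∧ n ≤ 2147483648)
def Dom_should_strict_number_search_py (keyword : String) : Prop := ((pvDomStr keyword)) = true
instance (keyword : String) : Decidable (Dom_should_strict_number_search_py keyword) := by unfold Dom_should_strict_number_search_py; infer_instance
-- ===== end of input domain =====

-- B replaces A's transform-then-test pipeline by a single classifying scan with flags and counters (alternative decomposition, same cost).


-- ===== PORT A =====
def should_strict_number_search_py (keyword : String) : Bool :=
  let stripped : List Char := keyword.toList.filter (fun ch => !PySem.Chars.isspace ch)
  if stripped.isEmpty then false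
  else if !(stripped.all (fun ch => ch.toNat ≤ 127)) then false  -- str.isascii ported by hand: exact (code point < 128)
  else
    let sanitized := PySem.Chars.replace (PySem.Chars.replace stripped ['-'] []) ['_'] []
    if !(PySem.Chars.strIsalnum sanitized) then false
    else
      let has_alpha := sanitized.any PySem.Chars.isalpha
      let has_digit := sanitized.any PySem.Chars.isdigit
      if has_alpha && has_digit then true
      else if PySem.Chars.strIsalpha sanitized && (decide (2 ≤ sanitized.length) && decide (sanitized.length ≤ 6)) then true
      else false

-- ===== PORT B =====
-- one classifying scan: state = (seen, non_ascii, invalid, alpha, digit)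
def should_strict_number_search_py_alt (keyword : String) : Bool :=
  let st := keyword.toList.foldl
    (fun (st : Bool × Bool × Bool × Nat × Nat) ch =>
      let (seen, non_ascii, invalid, alpha, digit) := st
      if PySem.Chars.isspace ch then (seen, non_ascii, invalid, alpha, digit)
      else if !(ch.toNat ≤ 127) then (true, true, invalid, alpha, digit)        -- not ch.isascii()
      else if ch = '-' ∨ ch = '_' then (true, non_ascii, invalid, alpha, digit) -- separator, removed
      else if PySem.Chars.isalpha ch then (true, non_ascii, invalid, alpha + 1, digit)
      else if PySem.Chars.isdigit ch then (true, non_ascii, invalid, alpha, digit + 1)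
      else (true, non_ascii, true, alpha, digit))
    (false, false, false, 0, 0)
  let (seen, non_ascii, invalid, alpha, digit) := st
  if !seen || non_ascii || invalid || alpha + digit == 0 then false
  else if alpha > 0 && digit > 0 then true
  else decide (digit = 0) && (decide (2 ≤ alpha) && decide (alpha ≤ 6))

-- ===== PRECONDITION & SPEC =====
def Spec_should_strict_number_search_py (keyword : String) (out : Bool) : Prop := out = should_strict_number_search_py_alt keyword
instance (keyword : String) (out : Bool) : Decidable (Spec_should_strict_number_search_py keyword out) := by unfold Spec_should_strict_number_search_py; infer_instance

-- ===== CLAIM (what is proved, stated in full; the proofs are below) =====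
def Claim_equal_should_strict_number_search_py : Prop := ∀ (keyword : String), Dom_should_strict_number_search_py keyword → Spec_should_strict_number_search_py keyword (should_strict_number_search_py keyword)

-- ===== LEMMAS AND PROOFS =====

-- s.replace(a, '') with a single-char pattern is a filter
theorem replace_go_single (a : Char) (fuel : Nat) (l acc : List Char) (h : l.length ≤ fuel) :
    PySem.Chars.replace.go [a] [] fuel l acc = acc.reverse ++ l.filter (fun c => c ≠ a) := by
  induction fuel generalizing l acc with
  | zero =>
    have : l = [] := List.eq_nil_of_length_eq_zero (Nat.le_zero.mp h)
    subst this; simp [PySem.Chars.replace.go]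
  | succ n ih =>
    cases l with
    | nil => simp [PySem.Chars.replace.go]
    | cons c t =>
      rw [PySem.Chars.replace.go]
      by_cases hc : c = a
      · subst hc
        simp only [List.isPrefixOf, BEq.rfl, Bool.true_and, List.isPrefixOf_nil_left, if_pos]
        rw [show List.drop [c].length (c :: t) = t from rfl,
            show ([] : List Char).reverse ++ acc = acc from rfl,
            ih t acc (by simpa using Nat.le_of_succ_le_succ h)]
        simp
      · have hpre : [a].isPrefixOf (c :: t) = false := by
          simp [List.isPrefixOf]; exact fun hca => absurd hca.symm hc
        rw [hpre]
        simp only [Bool.false_eq_true, if_false]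
        rw [ih t (c :: acc) (by simpa using Nat.le_of_succ_le_succ h)]
        simp [hc]

theorem replace_single (a : Char) (l : List Char) :
    PySem.Chars.replace l [a] [] = l.filter (fun c => c ≠ a) := by
  rw [PySem.Chars.replace, if_neg (by simp)]
  simpa using replace_go_single a l.length l [] le_rfl

-- the five classifying predicates of B's scan, as standalone predicates on a character
def pP (c : Char) : Bool := !PySem.Chars.isspace c
def pQ (c : Char) : Bool := pP c && !(c.toNat ≤ 127)
def pA (c : Char) : Bool := pP c && (c.toNat ≤ 127) && !(c = '-' || c = '_') && PySem.Chars.isalpha c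
def pD (c : Char) : Bool := pP c && (c.toNat ≤ 127) && !(c = '-' || c = '_') && !PySem.Chars.isalpha c && PySem.Chars.isdigit c
def pR (c : Char) : Bool := pP c && (c.toNat ≤ 127) && !(c = '-' || c = '_') && !PySem.Chars.isalpha c && !PySem.Chars.isdigit c

theorem fold_closed (l : List Char) (s n i : Bool) (a d : Nat) :
    l.foldl
      (fun (st : Bool × Bool × Bool × Nat × Nat) ch =>
        let (seen, non_ascii, invalid, alpha, digit) := st
        if PySem.Chars.isspace ch then (seen, non_ascii, invalid, alpha, digit)
        else if !(ch.toNat ≤ 127) then (true, true, invalid, alpha, digit)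
        else if ch = '-' ∨ ch = '_' then (true, non_ascii, invalid, alpha, digit)
        else if PySem.Chars.isalpha ch then (true, non_ascii, invalid, alpha + 1, digit)
        else if PySem.Chars.isdigit ch then (true, non_ascii, invalid, alpha, digit + 1)
        else (true, non_ascii, true, alpha, digit))
      (s, n, i, a, d)
    = (s || l.any pP, n || l.any pQ, i || l.any pR, a + l.countP pA, d + l.countP pD) := by
  induction l generalizing s n i a d with
  | nil => simp
  | cons c t ih =>
    simp only [List.foldl_cons, List.any_cons, List.countP_cons]
    by_cases hsp : PySem.Chars.isspace c
    · rw [if_pos hsp, ih]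
      simp [pP, pQ, pR, pA, pD, hsp]
    · rw [if_neg hsp]
      have hp : pP c = true := by simp [pP, hsp]
      by_cases hasc : c.toNat ≤ 127
      · rw [if_neg (by simpa using hasc)]
        by_cases hsep : c = '-' ∨ c = '_'
        · rw [if_pos hsep, ih]
          have h2 : pQ c = false := by simp [pQ, hasc]
          have h3 : pR c = false := by rcases hsep with h | h <;> subst h <;> decide
          have h4 : pA c = false := by rcases hsep with h | h <;> subst h <;> decide
          have h5 : pD c = false := by rcases hsep with h | h <;> subst h <;> decide
          simp [hp, h2, h3, h4, h5]
        · rw [if_neg hsep]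
          push_neg at hsep
          obtain ⟨hs1, hs2⟩ := hsep
          have h2 : pQ c = false := by simp [pQ, hasc]
          by_cases hal : PySem.Chars.isalpha c
          · rw [if_pos hal, ih]
            have h3 : pR c = false := by simp [pR, hal]
            have h4 : pA c = true := by simp [pA, pP, hsp, hasc, hs1, hs2, hal]
            have h5 : pD c = false := by simp [pD, hal]
            simp [hp, h2, h3, h4, h5]
            omega
          · rw [if_neg hal]
            by_cases hdg : PySem.Chars.isdigit c
            · rw [if_pos hdg, ih]
              have h3 : pR c = false := by simp [pR, hdg]
              have h4 : pA c = false := by simp [pA, hal]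
              have h5 : pD c = true := by simp [pD, pP, hsp, hasc, hs1, hs2, hal, hdg]
              simp [hp, h2, h3, h4, h5]
              omega
            · rw [if_neg hdg, ih]
              have h3 : pR c = true := by simp [pR, pP, hsp, hasc, hs1, hs2, hal, hdg]
              have h4 : pA c = false := by simp [pA, hal]
              have h5 : pD c = false := by simp [pD, hdg]
              simp [hp, h2, h3, h4, h5]
      · rw [if_pos (by simpa using hasc), ih]
        have h2 : pQ c = true := by simp [pQ, pP, hsp, hasc]
        have h3 : pR c = false := by simp [pR, hasc]
        have h4 : pA c = false := by simp [pA, hasc]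
        have h5 : pD c = false := by simp [pD, hasc]
        simp [hp, h2, h3, h4, h5]

theorem digit_not_alpha (c : Char) (h : PySem.Chars.isdigit c = true) :
    PySem.Chars.isalpha c = false := by
  simp only [PySem.Chars.isdigit, Bool.and_eq_true, decide_eq_true_eq] at h
  simp only [PySem.Chars.isalpha, PySem.Chars.isupper, PySem.Chars.islower,
    Bool.or_eq_false_iff, Bool.and_eq_false_iff, decide_eq_false_iff_not]
  constructor
  · by_cases hA : 'A' ≤ c
    · exact Or.inr (fun hc => absurd (le_trans hA h.2) (by decide))
    · exact Or.inl hA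
  · by_cases hA : 'a' ≤ c
    · exact Or.inr (fun hc => absurd (le_trans hA h.2) (by decide))
    · exact Or.inl hA

theorem countP_pos_iff_any (l : List Char) (p : Char → Bool) :
    0 < l.countP p ↔ l.any p = true := by
  rw [Nat.pos_iff_ne_zero, Ne, List.countP_eq_zero, List.any_eq_true]
  push_neg; simp


-- ===== VERDICT (by name: the statement is the Claim_ definition above) =====
theorem should_strict_number_search_py_spec : Claim_equal_should_strict_number_search_py := by
  intro keyword _
  unfold Spec_should_strict_number_search_py
  simp only [should_strict_number_search_py, should_strict_number_search_py_alt,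
    fold_closed, replace_single, Bool.false_or, Nat.zero_add]
  rw [show (fun ch => !PySem.Chars.isspace ch) = pP from rfl]
  set kl := keyword.toList with hkl
  set s1 := kl.filter pP with hs1
  by_cases hE : s1 = []
  · have h0 : kl.any pP = false := by
      simp only [hs1, List.filter_eq_nil_iff] at hE
      simpa [List.any_eq_true] using hE
    simp [hE, h0]
  · have h0 : kl.any pP = true := by
      obtain ⟨c, hc⟩ := List.exists_mem_of_ne_nil s1 hE
      rw [hs1, List.mem_filter] at hc
      exact List.any_eq_true.mpr ⟨c, hc.1, hc.2⟩
    rw [if_neg (by simpa [List.isEmpty_iff] using hE)]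
    by_cases hA : s1.all (fun ch => decide (ch.toNat ≤ 127))
    · -- all non-space characters are ASCII
      have hascii : ∀ c ∈ kl, pP c = true → c.toNat ≤ 127 := by
        simp only [hs1, List.all_eq_true, List.mem_filter] at hA
        intro c hc hpc
        simpa using hA c ⟨hc, hpc⟩
      have hq : kl.any pQ = false := by
        rw [List.any_eq_false]
        intro c hc
        simp only [pQ, Bool.and_eq_true, Bool.not_eq_true', decide_eq_false_iff_not, not_and]
        intro h1 h2
        exact h2 (hascii c hc h1)
      rw [if_neg (by simp [hA])]
      set san := (s1.filter (fun c => decide (c ≠ '-'))).filter (fun c => decide (c ≠ '_')) with hsan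
      have hcA : kl.countP pA = san.countP PySem.Chars.isalpha := by
        rw [hsan, List.countP_filter, List.countP_filter, hs1, List.countP_filter]
        apply List.countP_congr
        intro c hc
        have hasc : PySem.Chars.isspace c = false → c.toNat ≤ 127 :=
          fun h => hascii c hc (by simp [pP, h])
        simp only [pA, pP, Bool.and_eq_true, Bool.not_eq_true', Bool.or_eq_false_iff,
          decide_eq_false_iff_not, decide_eq_true_eq, ne_eq]
        constructor <;> intro h <;> tauto
      have hcD : kl.countP pD = san.countP PySem.Chars.isdigit := by
        rw [hsan, List.countP_filter, List.countP_filter, hs1, List.countP_filter]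
        apply List.countP_congr
        intro c hc
        have hasc : PySem.Chars.isspace c = false → c.toNat ≤ 127 :=
          fun h => hascii c hc (by simp [pP, h])
        have hna : PySem.Chars.isdigit c = true → PySem.Chars.isalpha c = false :=
          digit_not_alpha c
        simp only [pD, pP, Bool.and_eq_true, Bool.not_eq_true', Bool.or_eq_false_iff,
          decide_eq_false_iff_not, decide_eq_true_eq, ne_eq]
        constructor <;> intro h <;> tauto
      have hsanMem : ∀ c : Char, c ∈ san ↔ (c ∈ kl ∧ pP c = true ∧ c ≠ '-' ∧ c ≠ '_') := by
        intro c
        simp only [hsan, hs1, List.mem_filter, decide_eq_true_eq, ne_eq]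
        tauto
      have hcR : kl.any pR = san.any (fun c => !PySem.Chars.isalnum c) := by
        rw [Bool.eq_iff_iff, List.any_eq_true, List.any_eq_true]
        constructor
        · rintro ⟨c, hc, hrc⟩
          simp only [pR, pP, Bool.and_eq_true, Bool.not_eq_true', Bool.or_eq_false_iff,
            decide_eq_false_iff_not, decide_eq_true_eq] at hrc
          refine ⟨c, (hsanMem c).mpr ⟨hc, by simp [pP, hrc.1.1.1.1], hrc.1.1.2.1, hrc.1.1.2.2⟩, ?_⟩
          simp [PySem.Chars.isalnum, hrc.1.2, hrc.2]
        · rintro ⟨c, hcs, hcn⟩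
          obtain ⟨hc, hp, h3, h4⟩ := (hsanMem c).mp hcs
          simp only [Bool.not_eq_true', PySem.Chars.isalnum, Bool.or_eq_false_iff] at hcn
          have hspf : PySem.Chars.isspace c = false := by simpa [pP] using hp
          refine ⟨c, hc, ?_⟩
          simp [pR, pP, hspf, hascii c hc hp, h3, h4, hcn.1, hcn.2]
      rw [hcA, hcD, hcR]
      by_cases hN : san = []
      · simp [PySem.Chars.strIsalnum, hN, h0, hq]
      · by_cases hAl : san.all PySem.Chars.isalnum
        · have hst : PySem.Chars.strIsalnum san = true := by
            simp [PySem.Chars.strIsalnum, List.isEmpty_iff, hN, hAl]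
          have hR0 : san.any (fun c => !PySem.Chars.isalnum c) = false := by
            rw [List.any_eq_false]
            intro c hc
            simpa using List.all_eq_true.mp hAl c hc
          have hlen : san.countP PySem.Chars.isalpha + san.countP PySem.Chars.isdigit
              = san.length := by
            rw [List.length_eq_countP_add_countP PySem.Chars.isalpha]
            congr 1
            apply List.countP_congr
            intro c hc
            have hcal := List.all_eq_true.mp hAl c hc
            simp only [PySem.Chars.isalnum, Bool.or_eq_true] at hcal
            have hna := digit_not_alpha c
            simp only [decide_eq_true_eq, Bool.not_eq_true]
            constructor
            · intro h
              exact hna h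
            · intro h
              exact hcal.resolve_left (by simp [h])
          have hpos : 0 < san.length := List.length_pos_of_ne_nil hN
          simp only [hst, Bool.not_true, Bool.false_eq_true, if_false, h0, hq, hR0,
            Bool.not_true, Bool.or_false, Bool.false_or]
          have hsum : List.countP PySem.Chars.isalpha san + List.countP PySem.Chars.isdigit san ≠ 0 := by
            omega
          have hbsum : (List.countP PySem.Chars.isalpha san
              + List.countP PySem.Chars.isdigit san == 0) = false := by
            simpa using hsum
          rw [hbsum, if_neg (show ¬((false : Bool) = true) by simp)]
          by_cases hda : san.all PySem.Chars.isalpha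
          · have hd0 : san.countP PySem.Chars.isdigit = 0 := by
              rw [List.countP_eq_zero]
              intro c hc hdg
              exact absurd (List.all_eq_true.mp hda c hc)
                (by simp [digit_not_alpha c hdg])
            have hla : san.countP PySem.Chars.isalpha = san.length :=
              (List.countP_eq_length).mpr (List.all_eq_true.mp hda)
            have hsa : PySem.Chars.strIsalpha san = true := by
              simp [PySem.Chars.strIsalpha, List.isEmpty_iff, hN, hda]
            have hanyd : san.any PySem.Chars.isdigit = false := by
              rw [← Bool.not_eq_true, ← countP_pos_iff_any]
              omega
            simp [hanyd, hsa, hd0, hla]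
          · have hex : ∃ c ∈ san, PySem.Chars.isdigit c = true := by
              simp only [List.all_eq_true, not_forall] at hda
              obtain ⟨c, hc, hnc⟩ := hda
              have hcal := List.all_eq_true.mp hAl c hc
              simp only [PySem.Chars.isalnum, Bool.or_eq_true] at hcal
              exact ⟨c, hc, hcal.resolve_left hnc⟩
            have hdpos : 0 < san.countP PySem.Chars.isdigit :=
              (countP_pos_iff_any san PySem.Chars.isdigit).mpr (List.any_eq_true.mpr hex)
            have hanyd : san.any PySem.Chars.isdigit = true :=
              (countP_pos_iff_any san PySem.Chars.isdigit).mp hdpos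
            have hsa : PySem.Chars.strIsalpha san = false := by
              simp [PySem.Chars.strIsalpha, hda]
            have hδ : san.countP PySem.Chars.isdigit ≠ 0 := by omega
            by_cases hα : 0 < san.countP PySem.Chars.isalpha
            · have ha : san.any PySem.Chars.isalpha = true :=
                (countP_pos_iff_any san PySem.Chars.isalpha).mp hα
              have hb1 : decide (san.countP PySem.Chars.isalpha > 0) = true := by
                simpa using hα
              have hb2 : decide (san.countP PySem.Chars.isdigit > 0) = true := by
                simpa using hdpos
              rw [ha, hanyd, hb1, hb2]
              simp
            · have ha : san.any PySem.Chars.isalpha = false := by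
                rw [← Bool.not_eq_true, ← countP_pos_iff_any]
                omega
              have hb1 : decide (san.countP PySem.Chars.isalpha > 0) = false := by
                simpa using hα
              have hb3 : decide (san.countP PySem.Chars.isdigit = 0) = false := by
                simpa using hδ
              rw [ha, hanyd, hsa, hb1, hb3]
              simp
        · have hst : PySem.Chars.strIsalnum san = false := by
            simp [PySem.Chars.strIsalnum, hAl]
          have hR1 : san.any (fun c => !PySem.Chars.isalnum c) = true := by
            simp only [List.all_eq_true, not_forall] at hAl
            obtain ⟨c, hc, hnc⟩ := hAl
            exact List.any_eq_true.mpr ⟨c, hc, by simpa using hnc⟩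
          simp [hst, hR1, h0, hq]
    · have hq : kl.any pQ = true := by
        simp only [hs1, List.all_eq_true, List.mem_filter, not_forall] at hA
        obtain ⟨c, hc, hnc⟩ := hA
        refine List.any_eq_true.mpr ⟨c, hc.1, ?_⟩
        simp only [pQ, Bool.and_eq_true, Bool.not_eq_true', decide_eq_false_iff_not]
        simp only [decide_eq_true_eq] at hnc
        exact ⟨hc.2, hnc⟩
      rw [if_pos (by simp [hA])]
      simp [hq, h0]
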